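-- pv_equiv track=rewrite | github.com/eltermi/SWL | backend/routes/contratos_routes.py | _construir_resumen_contrato
-- ===== SOURCE A (Python) =====
-- def _normalizar_tipo_animal(valor):
--     if valor is None:
--         return ""
--     return str(valor).strip().lower()
--
-- def _formatear_lista_natural(elementos):
--     items = [str(item).strip() for item in elementos if item and str(item).strip()]
--     if not items:
--         return ""
--     if len(items) == 1:
--         return items[0]
--     if len(items) == 2:
--         return f"{items[0]} y {items[1]}"
--     return f"{', '.join(items[:-1])} y {items[-1]}"
--
-- def _deserializar_animales_calendario(valor):
--     if not valor:
--         return []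
--
--     animales = []
--     for item in str(valor).split("||"):
--         if not item:
--             continue
--         partes = item.split("::", 2)
--         if len(partes) != 3:
--             continue
--         id_animal, tipo_animal, nombre = partes
--         try:
--             id_animal_int = int(id_animal)
--         except (TypeError, ValueError):
--             continue
--         nombre_limpio = str(nombre).strip()
--         if not nombre_limpio:
--             continue
--         animales.append({
--             "id_animal": id_animal_int,
--             "tipo_animal": _normalizar_tipo_animal(tipo_animal),
--             "nombre": nombre_limpio,
--         })
--     return animales
--
-- def _construir_resumen_contrato(fila):
--     animales = _deserializar_animales_calendario(fila.get("animales_calendario"))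
--     gatos = [animal["nombre"] for animal in animales if animal["tipo_animal"] == "gato"]
--     perros = [animal["nombre"] for animal in animales if animal["tipo_animal"] == "perro"]
--
--     if gatos:
--         return f"CS - {_formatear_lista_natural(gatos[:3])}"
--     if perros:
--         return f"DB - {perros[0]}"
--     return f"Contrato {fila.get('id_contrato')}"
-- ===== SOURCE B (Python) =====
-- def _construir_resumen_contrato(fila):
--     valor = fila.get("animales_calendario")
--     gatos = []
--     perro = None
--     if valor:
--         for item in str(valor).split("||"):
--             partes = item.split("::", 2)
--             if len(partes) != 3:
--                 continue
--             try:
--                 int(partes[0])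
--             except (TypeError, ValueError):
--                 continue
--             nombre = partes[2].strip()
--             if not nombre:
--                 continue
--             tipo = partes[1].strip().lower()
--             if tipo == "gato":
--                 if len(gatos) < 3:
--                     gatos.append(nombre)
--             elif tipo == "perro" and perro is None:
--                 perro = nombre
--     if gatos:
--         if len(gatos) == 1:
--             cuerpo = gatos[0]
--         elif len(gatos) == 2:
--             cuerpo = f"{gatos[0]} y {gatos[1]}"
--         else:
--             cuerpo = f"{gatos[0]}, {gatos[1]} y {gatos[2]}"
--         return f"CS - {cuerpo}"
--     if perro is not None:
--         return f"DB - {perro}"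
--     return f"Contrato {fila.get('id_contrato')}"
-- ===== Notes on version B (the rewrite author's own statement) =====
-- stated objective: alternative
-- what changed: Replaced the deserialize-to-dicts pipeline (build full record list, then two filtering comprehensions, then a helper that re-strips and joins) by a single inlined pass over the '||' items that keeps only a capped 3-cat name list and the first dog name, formatting the result by direct case analysis.
import Mathlib
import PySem

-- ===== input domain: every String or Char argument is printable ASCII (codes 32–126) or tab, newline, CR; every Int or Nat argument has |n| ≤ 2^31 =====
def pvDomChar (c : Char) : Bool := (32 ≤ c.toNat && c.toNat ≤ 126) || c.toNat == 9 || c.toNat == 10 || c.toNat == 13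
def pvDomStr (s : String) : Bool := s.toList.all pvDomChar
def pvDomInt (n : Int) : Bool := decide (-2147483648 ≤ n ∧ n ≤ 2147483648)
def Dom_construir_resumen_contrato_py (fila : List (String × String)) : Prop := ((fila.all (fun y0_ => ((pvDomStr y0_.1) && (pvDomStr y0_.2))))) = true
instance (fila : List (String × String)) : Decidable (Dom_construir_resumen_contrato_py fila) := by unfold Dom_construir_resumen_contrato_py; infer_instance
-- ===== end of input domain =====

-- B replaces A's deserialize-then-filter-then-format pipeline by one inlined pass keeping
-- only the first 3 cat names and the first dog name (objective: alternative decomposition).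

-- fila.get(k): first-match lookup in the association list (the dict convention)
def pyFilaGet (fila : List (String × String)) (k : String) : Option String :=
  (fila.find? (fun p => p.1 == k)).map (fun p => p.2)

-- ===== PORT A =====

def normalizar_tipo_animal (valor : String) : String :=
  PySem.Str.lower (PySem.Str.strip valor)

-- items[:-1] is List.dropLast and items[-1] is getLastD (items nonempty on that branch)
def formatear_lista_natural (elementos : List String) : String :=
  let items := (elementos.filter (fun it => it != "" && PySem.Str.strip it != "")).map PySem.Str.strip
  if items = [] then ""
  else if items.length = 1 then items.headD ""
  else if items.length = 2 then items.headD "" ++ " y " ++ items.getD 1 ""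
  else PySem.Str.join ", " items.dropLast ++ " y " ++ items.getLastD ""

def deserializarStep (animales : List (Int × String × String)) (item : String) :
    List (Int × String × String) :=
  if item = "" then animales
  else
    let partes := (PySem.Str.splitMax? item "::" 2).getD []
    if partes.length ≠ 3 then animales
    else
      match PySem.Int.ofStr? (partes.getD 0 "") with
      | none => animales
      | some id_animal_int =>
        let nombre_limpio := PySem.Str.strip (partes.getD 2 "")
        if nombre_limpio = "" then animales
        else animales ++ [(id_animal_int, normalizar_tipo_animal (partes.getD 1 ""), nombre_limpio)]

def deserializar_animales_calendario (valor : Option String) : List (Int × String × String) :=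
  match valor with
  | none => []
  | some v =>
    if v = "" then []
    else ((PySem.Str.split? v "||").getD []).foldl deserializarStep []

def construir_resumen_contrato_py (fila : List (String × String)) : String :=
  let animales := deserializar_animales_calendario (pyFilaGet fila "animales_calendario")
  let gatos := (animales.filter (fun a => a.2.1 == "gato")).map (fun a => a.2.2)
  let perros := (animales.filter (fun a => a.2.1 == "perro")).map (fun a => a.2.2)
  if gatos ≠ [] then "CS - " ++ formatear_lista_natural (gatos.take 3)
  else if perros ≠ [] then "DB - " ++ perros.headD ""
  else "Contrato " ++ ((pyFilaGet fila "id_contrato").getD "None")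

-- ===== PORT B =====

def resumenStep (st : List String × Option String) (item : String) :
    List String × Option String :=
  let partes := (PySem.Str.splitMax? item "::" 2).getD []
  if partes.length ≠ 3 then st
  else
    match PySem.Int.ofStr? (partes.getD 0 "") with
    | none => st
    | some _ =>
      let nombre := PySem.Str.strip (partes.getD 2 "")
      if nombre = "" then st
      else
        let tipo := PySem.Str.lower (PySem.Str.strip (partes.getD 1 ""))
        if tipo = "gato" then
          if st.1.length < 3 then (st.1 ++ [nombre], st.2) else st
        else if tipo = "perro" ∧ st.2 = none then (st.1, some nombre)
        else st

def construir_resumen_contrato_py_alt (fila : List (String × String)) : String :=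
  let st :=
    match pyFilaGet fila "animales_calendario" with
    | none => (([] : List String), (none : Option String))
    | some v =>
      if v = "" then ([], none)
      else ((PySem.Str.split? v "||").getD []).foldl resumenStep ([], none)
  match st.1, st.2 with
  | [a], _ => "CS - " ++ a
  | [a, b], _ => "CS - " ++ (a ++ " y " ++ b)
  | a :: b :: c :: _, _ => "CS - " ++ (a ++ ", " ++ b ++ " y " ++ c)
  | [], some p => "DB - " ++ p
  | [], none => "Contrato " ++ ((pyFilaGet fila "id_contrato").getD "None")

-- ===== PRECONDITION & SPEC =====
def Spec_construir_resumen_contrato_py (fila : List (String × String)) (out : String) : Prop := out = construir_resumen_contrato_py_alt fila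
instance (fila : List (String × String)) (out : String) : Decidable (Spec_construir_resumen_contrato_py fila out) := by unfold Spec_construir_resumen_contrato_py; infer_instance

-- ===== CLAIM (what is proved, stated in full; the proofs are below) =====
def Claim_equal_construir_resumen_contrato_py : Prop := ∀ (fila : List (String × String)), Dom_construir_resumen_contrato_py fila → Spec_construir_resumen_contrato_py fila (construir_resumen_contrato_py fila)

-- ===== LEMMAS AND PROOFS =====

theorem dw_dw {p : Char → Bool} (cs : List Char) : (cs.dropWhile p).dropWhile p = cs.dropWhile p := by
  induction cs with
  | nil => simp
  | cons a l ih => by_cases h : p a <;> simp [h, ih]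

theorem dw_prefix {p : Char → Bool} {z y : List Char} (hz : z <+: y) (hy : y.dropWhile p = y) :
    z.dropWhile p = z := by
  cases z with
  | nil => simp
  | cons a l =>
    obtain ⟨t, ht⟩ := hz
    by_cases h : p a
    · exfalso
      have hle := congrArg List.length hy
      rw [← ht] at hle
      simp [h] at hle
      have h2 := List.length_dropWhile_le p (l ++ t)
      have h3 : (l ++ t).length = l.length + t.length := by simp
      omega
    · simp [h]

theorem strip_strip (cs : List Char) :
    PySem.Chars.strip (PySem.Chars.strip cs) = PySem.Chars.strip cs := by
  simp only [PySem.Chars.strip, PySem.Chars.lstrip, PySem.Chars.rstrip]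
  generalize hy : List.dropWhile PySem.Chars.isspace cs = y
  have hly : y.dropWhile PySem.Chars.isspace = y := by rw [← hy]; exact dw_dw cs
  have hpre : (y.reverse.dropWhile PySem.Chars.isspace).reverse <+: y := by
    have := List.dropWhile_suffix (l := y.reverse) PySem.Chars.isspace
    simpa using this.reverse
  rw [dw_prefix hpre hly]
  simp [dw_dw]

theorem str_strip_strip (s : String) : PySem.Str.strip (PySem.Str.strip s) = PySem.Str.strip s := by
  simp [PySem.Str.strip, strip_strip]

theorem join_two (a b : String) : PySem.Str.join ", " [a, b] = a ++ ", " ++ b := by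
  simp only [PySem.Str.join, PySem.Chars.join]
  conv_rhs => rw [← String.ofList_toList (s := a ++ ", " ++ b)]
  congr 1
  simp [List.intercalate]

-- A's records carry stripped, nonempty names
def GoodRec (r : Int × String × String) : Prop :=
  PySem.Str.strip r.2.2 = r.2.2 ∧ r.2.2 ≠ ""

-- abstraction from A's record list to B's state
def absSt (acc : List (Int × String × String)) : List String × Option String :=
  (((acc.filter (fun a => a.2.1 == "gato")).map (fun a => a.2.2)).take 3,
   ((acc.filter (fun a => a.2.1 == "perro")).map (fun a => a.2.2)).head?)


theorem absSt_append_rec (acc : List (Int × String × String)) (r : Int × String × String) :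
    absSt (acc ++ [r]) =
      (((acc.filter (fun a => a.2.1 == "gato")).map (fun a => a.2.2)
         ++ (if r.2.1 == "gato" then [r.2.2] else [])).take 3,
       ((acc.filter (fun a => a.2.1 == "perro")).map (fun a => a.2.2)
         ++ (if r.2.1 == "perro" then [r.2.2] else [])).head?) := by
  unfold absSt
  rw [List.filter_append, List.filter_append, List.map_append, List.map_append]
  by_cases hg : r.2.1 == "gato" <;> by_cases hp : r.2.1 == "perro" <;>
    simp [hg, hp]

theorem take3_append_one (l : List String) (x : String) :
    (l ++ [x]).take 3 = if (l.take 3).length < 3 then l.take 3 ++ [x] else l.take 3 := by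
  rw [List.take_append]
  by_cases h : l.length < 3
  · have h1 : l.take 3 = l := List.take_of_length_le (by omega)
    have h2 : (3 - l.length) ≠ 0 := by omega
    simp [h1, h]
    cases hk : 3 - l.length with
    | zero => omega
    | succ k => simp
  · have h1 : (l.take 3).length = 3 := by simp; omega
    have h2 : 3 - l.length = 0 := by omega
    simp [h1, h2]

set_option maxHeartbeats 1600000 in
theorem step_abs (acc : List (Int × String × String)) (item : String) :
    resumenStep (absSt acc) item = absSt (deserializarStep acc item) := by
  by_cases hi : item = ""
  · subst hi
    have hp : ((PySem.Str.splitMax? "" "::" 2).getD []).length = 1 := by decide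
    simp [resumenStep, deserializarStep, hp]
  · simp only [resumenStep, deserializarStep, if_neg hi]
    generalize (PySem.Str.splitMax? item "::" 2).getD [] = P
    by_cases h3 : P.length ≠ 3
    · simp only [if_pos h3]
    · simp only [if_neg h3]
      cases PySem.Int.ofStr? (P.getD 0 "") with
      | none => rfl
      | some n =>
        simp only []
        by_cases hn : PySem.Str.strip (P.getD 2 "") = ""
        · simp only [if_pos hn]
        · simp only [if_neg hn]
          rw [show normalizar_tipo_animal (P.getD 1 "") =
                PySem.Str.lower (PySem.Str.strip (P.getD 1 "")) from rfl]
          rw [absSt_append_rec]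
          generalize PySem.Str.lower (PySem.Str.strip (P.getD 1 "")) = tipo
          generalize PySem.Str.strip (P.getD 2 "") = nombre
          simp only [absSt]
          by_cases hg : tipo = "gato"
          · have hb1 : (tipo == "gato") = true := by simp [hg]
            have hb2 : (tipo == "perro") = false := by simp [hg]
            simp only [if_pos hg, hb1, hb2, if_true]
            rw [take3_append_one]
            split_ifs <;> first | contradiction | simp
          · by_cases hp : tipo = "perro"
            · have hb1 : (tipo == "gato") = false := by simp [hp]
              have hb2 : (tipo == "perro") = true := by simp [hp]
              simp only [if_neg hg, hb1, hb2, if_true]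
              cases hd : (acc.filter (fun a => a.2.1 == "perro")).map (fun a => a.2.2) with
              | nil => simp [hp]
              | cons d t => simp [hp]
            · have hb1 : (tipo == "gato") = false := by simp [hg]
              have hb2 : (tipo == "perro") = false := by simp [hp]
              simp only [if_neg hg, hb1, hb2]
              have hcnd : ¬ (tipo = "perro" ∧ (List.take 3 ((acc.filter (fun a => a.2.1 == "gato")).map (fun a => a.2.2)),
                  ((acc.filter (fun a => a.2.1 == "perro")).map (fun a => a.2.2)).head?).2 = none) := by
                intro hc; exact hp hc.1
              rw [if_neg hcnd]
              simp

theorem step_cases (acc : List (Int × String × String)) (item : String) :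
    deserializarStep acc item = acc ∨
      ∃ r, GoodRec r ∧ deserializarStep acc item = acc ++ [r] := by
  unfold deserializarStep
  by_cases hi : item = ""
  · left; rw [if_pos hi]
  · rw [if_neg hi]
    simp only []
    by_cases h3 : ((PySem.Str.splitMax? item "::" 2).getD []).length ≠ 3
    · left; rw [if_pos h3]
    · rw [if_neg h3]
      cases PySem.Int.ofStr? (((PySem.Str.splitMax? item "::" 2).getD []).getD 0 "") with
      | none => left; rfl
      | some n =>
        by_cases hn : PySem.Str.strip (((PySem.Str.splitMax? item "::" 2).getD []).getD 2 "") = ""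
        · left; simp only [if_pos hn]
        · right
          refine ⟨(n, normalizar_tipo_animal (((PySem.Str.splitMax? item "::" 2).getD []).getD 1 ""),
            PySem.Str.strip (((PySem.Str.splitMax? item "::" 2).getD []).getD 2 "")),
            ⟨str_strip_strip _, hn⟩, ?_⟩
          simp only [if_neg hn]

theorem step_good (acc : List (Int × String × String)) (item : String)
    (h : ∀ r ∈ acc, GoodRec r) : ∀ r ∈ deserializarStep acc item, GoodRec r := by
  rcases step_cases acc item with hc | ⟨r', hgr, hc⟩ <;> rw [hc]
  · exact h
  · intro r hr
    rcases List.mem_append.mp hr with hr | hr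
    · exact h r hr
    · simp at hr; subst hr; exact hgr

theorem fold_abs (items : List String) (acc : List (Int × String × String)) :
    items.foldl resumenStep (absSt acc) = absSt (items.foldl deserializarStep acc) := by
  induction items generalizing acc with
  | nil => rfl
  | cons i t ih => simp only [List.foldl_cons, step_abs]; exact ih _

theorem fold_good (items : List String) (acc : List (Int × String × String))
    (h : ∀ r ∈ acc, GoodRec r) : ∀ r ∈ items.foldl deserializarStep acc, GoodRec r := by
  induction items generalizing acc with
  | nil => exact h
  | cons i t ih => exact ih _ (step_good _ _ h)

theorem fmt_good (gatos : List String) (hg : ∀ g ∈ gatos, PySem.Str.strip g = g ∧ g ≠ "") :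
    (gatos.filter (fun it => it != "" && PySem.Str.strip it != "")).map PySem.Str.strip = gatos := by
  induction gatos with
  | nil => rfl
  | cons a l ih =>
    have ha := hg a (List.mem_cons_self ..)
    have hcond : (a != "" && PySem.Str.strip a != "") = true := by
      rw [ha.1]; simp [ha.2]
    rw [List.filter_cons, if_pos hcond, List.map_cons, ha.1,
      ih (fun g hgl => hg g (List.mem_cons_of_mem a hgl))]


theorem final_fmt (recs : List (Int × String × String)) (hg : ∀ r ∈ recs, GoodRec r)
    (contrato : String) :
    (if ((recs.filter (fun a => a.2.1 == "gato")).map (fun a => a.2.2)) ≠ [] then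
       "CS - " ++ formatear_lista_natural (((recs.filter (fun a => a.2.1 == "gato")).map (fun a => a.2.2)).take 3)
     else if ((recs.filter (fun a => a.2.1 == "perro")).map (fun a => a.2.2)) ≠ [] then
       "DB - " ++ ((recs.filter (fun a => a.2.1 == "perro")).map (fun a => a.2.2)).headD ""
     else contrato) =
    (match (absSt recs).1, (absSt recs).2 with
     | [a], _ => "CS - " ++ a
     | [a, b], _ => "CS - " ++ (a ++ " y " ++ b)
     | a :: b :: c :: _, _ => "CS - " ++ (a ++ ", " ++ b ++ " y " ++ c)
     | [], some p => "DB - " ++ p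
     | [], none => contrato) := by
  have hgood : ∀ g ∈ (recs.filter (fun a => a.2.1 == "gato")).map (fun a => a.2.2),
      PySem.Str.strip g = g ∧ g ≠ "" := by
    intro g hgm
    obtain ⟨r, hr, hre⟩ := List.mem_map.mp hgm
    have hgr := hg r (List.mem_filter.mp hr).1
    exact hre ▸ ⟨hgr.1, hgr.2⟩
  simp only [absSt]
  cases hG : (recs.filter (fun a => a.2.1 == "gato")).map (fun a => a.2.2) with
  | nil =>
    simp only [ne_eq, not_true_eq_false, if_false, List.take_nil]
    cases hP : (recs.filter (fun a => a.2.1 == "perro")).map (fun a => a.2.2) with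
    | nil => simp
    | cons p t => simp
  | cons g1 t1 =>
    have h1 : ∀ g ∈ g1 :: t1, PySem.Str.strip g = g ∧ g ≠ "" := hG ▸ hgood
    have hg1 := h1 g1 (by simp)
    simp only [ne_eq, reduceCtorEq, not_false_eq_true, if_true]
    cases t1 with
    | nil =>
      have : formatear_lista_natural [g1] = g1 := by
        unfold formatear_lista_natural
        rw [fmt_good [g1] h1]
        simp
      simp [this]
    | cons g2 t2 =>
      have hg2 := h1 g2 (by simp)
      cases t2 with
      | nil =>
        have : formatear_lista_natural [g1, g2] = g1 ++ " y " ++ g2 := by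
          unfold formatear_lista_natural
          rw [fmt_good [g1, g2] h1]
          simp
        simp [this]
      | cons g3 t3 =>
        have hg3 := h1 g3 (by simp)
        have h123 : ∀ g ∈ [g1, g2, g3], PySem.Str.strip g = g ∧ g ≠ "" := by
          intro g hgm
          apply h1
          simp at hgm
          rcases hgm with h | h | h <;> simp [h]
        have htake : (g1 :: g2 :: g3 :: t3).take 3 = [g1, g2, g3] := by simp
        have : formatear_lista_natural [g1, g2, g3] = g1 ++ ", " ++ g2 ++ " y " ++ g3 := by
          unfold formatear_lista_natural
          rw [fmt_good [g1, g2, g3] h123]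
          have hJ : PySem.Str.join ", " [g1, g2] = g1 ++ ", " ++ g2 := join_two g1 g2
          simp [hJ]
        simp [htake, this, String.append_assoc]


-- ===== VERDICT (by name: the statement is the Claim_ definition above) =====
theorem construir_resumen_contrato_py_spec : Claim_equal_construir_resumen_contrato_py := by
  intro fila _
  unfold Spec_construir_resumen_contrato_py
  unfold construir_resumen_contrato_py construir_resumen_contrato_py_alt
    deserializar_animales_calendario
  cases hv : pyFilaGet fila "animales_calendario" with
  | none => simp
  | some v =>
    by_cases hv0 : v = ""
    · simp [hv0]
    · simp only [if_neg hv0]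
      have habs := fold_abs ((PySem.Str.split? v "||").getD []) []
      have habs0 : absSt [] = ([], none) := rfl
      rw [habs0] at habs
      have hgood := fold_good ((PySem.Str.split? v "||").getD []) []
        (by intro r hr; simp at hr)
      rw [habs]
      exact final_fmt _ hgood _
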